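-- pv_equiv track=rewrite | github.com/liuhuigmail/DeepSmellDetection | Baselines/TACO.py | get_package_name
-- ===== SOURCE A (Python) =====
-- def get_package_name(classname2):
--     t=classname2.split('.')
--     ans=""
--     for i in range(len(t)-1):
--         if i>0:
--             ans+="."
--         ans+=t[i]
--     return ans
-- ===== SOURCE B (Python) =====
-- def get_package_name(classname2):
--     idx = classname2.rfind('.')
--     if idx != -1:
--         return classname2[:idx]
--     return ""
-- ===== Notes on version B (the rewrite author's own statement) =====
-- stated objective: simpler
-- what changed: Replaces splitting the string into a list of segments and rejoining all but the last in an indexed loop with a single rightmost-separator scan (rfind) plus one slice; no segment list is ever built.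
import Mathlib
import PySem

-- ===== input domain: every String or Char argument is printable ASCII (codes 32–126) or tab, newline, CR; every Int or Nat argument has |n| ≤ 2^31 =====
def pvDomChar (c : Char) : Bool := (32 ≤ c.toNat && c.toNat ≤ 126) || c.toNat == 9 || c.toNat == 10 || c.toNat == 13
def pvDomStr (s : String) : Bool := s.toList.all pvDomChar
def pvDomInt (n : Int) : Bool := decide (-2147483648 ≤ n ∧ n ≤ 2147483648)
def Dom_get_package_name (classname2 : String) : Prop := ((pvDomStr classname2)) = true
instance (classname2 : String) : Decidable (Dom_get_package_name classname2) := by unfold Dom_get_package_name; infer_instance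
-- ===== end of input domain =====

-- B replaces split-into-segments-and-rejoin with a single rightmost-separator scan (rfind) plus one slice; objective: simpler.

-- ===== PORT A =====
-- s.split('.') (nonempty separator) is PySem.Chars.splitOn on the code points; the loop
-- over range(len(t)-1) is a foldl over PySem.List.pyRange, t[i] via PySem.List.pyGet?
-- (always in range here, so .getD [] never fires).
def get_package_name (classname2 : String) : String :=
  let t := PySem.Chars.splitOn classname2.toList ['.']
  let ans : List Char :=
    (PySem.List.pyRange 0 ((t.length : Int) - 1) 1).foldl
      (fun ans i =>
        let ans := if 0 < i then ans ++ ['.'] else ans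
        ans ++ ((PySem.List.pyGet? t i).getD []))
      []
  String.ofList ans

-- ===== PORT B =====
-- rfind gives the index of the last separator; the prefix slice is PySem.Chars.slice with stop = idx.
def get_package_name_alt (classname2 : String) : String :=
  let idx := PySem.Str.rfind classname2 "."
  if idx ≠ -1 then
    String.ofList (PySem.Chars.slice classname2.toList none (some idx))
  else
    ""

-- ===== PRECONDITION & SPEC =====
def Spec_get_package_name (classname2 : String) (out : String) : Prop := out = get_package_name_alt classname2
instance (classname2 : String) (out : String) : Decidable (Spec_get_package_name classname2 out) := by unfold Spec_get_package_name; infer_instance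

-- ===== CLAIM (what is proved, stated in full; the proofs are below) =====
def Claim_equal_get_package_name : Prop := ∀ (classname2 : String), Dom_get_package_name classname2 → Spec_get_package_name classname2 (get_package_name classname2)

-- ===== LEMMAS AND PROOFS =====

-- Natural single-char split: mysplit pre l splits pre ++ l at '.', pre already dot-free text of the current segment.
def mysplit (pre : List Char) : List Char → List (List Char)
  | [] => [pre]
  | c :: rest => if c = '.' then pre :: mysplit [] rest else mysplit (pre ++ [c]) rest

lemma mysplit_dot (pre rest : List Char) : mysplit pre ('.' :: rest) = pre :: mysplit [] rest := by
  simp [mysplit]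

lemma mysplit_nodot {c : Char} (hc : c ≠ '.') (pre rest : List Char) :
    mysplit pre (c :: rest) = mysplit (pre ++ [c]) rest := by
  simp [mysplit, hc]

lemma mysplit_ne_nil (pre : List Char) (l : List Char) : mysplit pre l ≠ [] := by
  induction l generalizing pre with
  | nil => simp [mysplit]
  | cons c rest ih =>
    simp only [mysplit]
    split
    · simp
    · exact ih _

lemma splitOn_go_eq : ∀ (l : List Char) (fuel : Nat), l.length ≤ fuel → ∀ (cur : List Char) (accs : List (List Char)),
    PySem.Chars.splitOn.go ['.'] fuel l cur accs = accs.reverse ++ mysplit cur.reverse l := by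
  intro l
  induction l with
  | nil =>
    intro fuel _ cur accs
    cases fuel <;> simp [PySem.Chars.splitOn.go, mysplit]
  | cons c rest ih =>
    intro fuel hf cur accs
    cases fuel with
    | zero => simp at hf
    | succ f =>
      simp only [PySem.Chars.splitOn.go]
      by_cases hc : c = '.'
      · subst hc
        rw [if_pos (by simp [List.isPrefixOf])]
        simp only [List.length_cons, List.drop_succ_cons, List.length_nil, List.drop_zero]
        rw [ih f (by simpa using hf) [] (cur.reverse :: accs)]
        rw [mysplit_dot]
        simp
      · rw [if_neg (by simp [List.isPrefixOf]; intro h; exact hc h.symm)]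
        rw [ih f (by simpa using hf) (c :: cur) accs]
        rw [mysplit_nodot hc]
        simp

lemma splitOn_eq (cs : List Char) : PySem.Chars.splitOn cs ['.'] = mysplit [] cs := by
  have h := splitOn_go_eq cs (cs.length + 1) (by omega) [] []
  simpa [PySem.Chars.splitOn] using h

-- joinB joins segments with '.' (A's loop result on the dropLast of the segment list).
def joinB : List (List Char) → List Char
  | [] => []
  | [x] => x
  | x :: y :: r => x ++ '.' :: joinB (y :: r)

lemma joinB_snoc (xs : List (List Char)) (y : List Char) (h : xs ≠ []) :
    joinB (xs ++ [y]) = joinB xs ++ '.' :: y := by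
  induction xs with
  | nil => simp at h
  | cons x rest ih =>
    cases rest with
    | nil => simp [joinB]
    | cons x2 r =>
      have := ih (by simp)
      simp only [List.cons_append, joinB] at this ⊢
      rw [this]
      simp

lemma joinB_mysplit (l : List Char) : ∀ pre, joinB (mysplit pre l) = pre ++ l := by
  induction l with
  | nil => intro pre; simp [mysplit, joinB]
  | cons c rest ih =>
    intro pre
    by_cases hc : c = '.'
    · subst hc
      rw [mysplit_dot]
      have hne := mysplit_ne_nil [] rest
      cases hm : mysplit [] rest with
      | nil => exact absurd hm hne
      | cons y r =>
        have h2 := ih []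
        rw [hm] at h2
        simp only [joinB]
        rw [h2]
        simp
    · rw [mysplit_nodot hc]
      rw [ih (pre ++ [c])]
      simp

lemma mysplit_singleton (l : List Char) : ∀ pre x, mysplit pre l = [x] → '.' ∉ l := by
  induction l with
  | nil => intro pre x _; simp
  | cons c rest ih =>
    intro pre x h
    by_cases hc : c = '.'
    · subst hc
      rw [mysplit_dot] at h
      have hne := mysplit_ne_nil ([] : List Char) rest
      cases hm : mysplit [] rest with
      | nil => exact absurd hm hne
      | cons y r => rw [hm] at h; simp at h
    · rw [mysplit_nodot hc] at h
      have hrest := ih _ _ h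
      simp [hrest]
      exact fun e => hc e.symm

lemma mysplit_getLast_nodot (l : List Char) : ∀ pre, '.' ∉ pre → ∀ h, '.' ∉ (mysplit pre l).getLast h := by
  induction l with
  | nil => intro pre hp h; simpa [mysplit] using hp
  | cons c rest ih =>
    intro pre hp h
    by_cases hc : c = '.'
    · subst hc
      simp only [mysplit_dot] at h ⊢
      rw [List.getLast_cons (mysplit_ne_nil [] rest)]
      exact ih [] (by simp) _
    · simp only [mysplit_nodot hc] at h ⊢
      exact ih (pre ++ [c]) (by simp [hp]; exact fun e => hc e.symm) _

lemma pyRange_zero (k : Nat) : PySem.List.pyRange 0 (k : Int) 1 = List.map (fun (j : Nat) => (j : Int)) (List.range k) := by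
  simp only [PySem.List.pyRange, if_neg one_ne_zero]
  split_ifs with h1 h2
  · have hk : (((k : Int) - 0 + 1 - 1) / 1).toNat = k := by simp
    rw [hk]
    simp
  · have hk0 : k = 0 := by omega
    subst hk0
    simp
  · norm_num at h1
  · norm_num at h1

lemma isPrefixOf_dot (l : List Char) : ['.'].isPrefixOf l = true ↔ l.head? = some '.' := by
  cases l with
  | nil => simp [List.isPrefixOf]
  | cons c t =>
    simp [List.isPrefixOf]
    exact eq_comm

lemma rfind_go_none (s : List Char) : ∀ n, (∀ j ≤ n, s[j]? ≠ some '.') → PySem.Chars.rfind.go s ['.'] n = -1 := by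
  intro n
  induction n with
  | zero =>
    intro hnone
    simp only [PySem.Chars.rfind.go]
    rw [if_neg]
    intro hpre
    rw [isPrefixOf_dot] at hpre
    exact hnone 0 le_rfl (by simpa [List.head?_eq_getElem?] using hpre)
  | succ m ih =>
    intro hnone
    simp only [PySem.Chars.rfind.go]
    rw [if_neg]
    · exact ih (fun j hj => hnone j (by omega))
    · intro hpre
      rw [isPrefixOf_dot] at hpre
      rw [List.head?_drop] at hpre
      exact hnone (m + 1) le_rfl hpre

lemma rfind_go_some (s : List Char) : ∀ n k, k ≤ n → s[k]? = some '.' →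
    (∀ j, k < j → j ≤ n → s[j]? ≠ some '.') → PySem.Chars.rfind.go s ['.'] n = (k : Int) := by
  intro n
  induction n with
  | zero =>
    intro k hk hdot _
    interval_cases k
    have hpre : ['.'].isPrefixOf s = true := by
      rw [isPrefixOf_dot, List.head?_eq_getElem?]; exact hdot
    simp only [PySem.Chars.rfind.go, if_pos hpre, Nat.cast_zero]
  | succ m ih =>
    intro k hk hdot hafter
    simp only [PySem.Chars.rfind.go]
    by_cases hke : k = m + 1
    · subst hke
      have hpre : ['.'].isPrefixOf (s.drop (m + 1)) = true := by
        rw [isPrefixOf_dot, List.head?_drop]; exact hdot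
      rw [if_pos hpre]
    · rw [if_neg]
      · exact ih k (by omega) hdot (fun j h1 h2 => hafter j h1 (by omega))
      · intro hpre
        rw [isPrefixOf_dot, List.head?_drop] at hpre
        exact hafter (m + 1) (by omega) le_rfl hpre

lemma foldA (t : List (List Char)) : ∀ n, n ≤ t.length →
    (List.map (fun (j : Nat) => (j : Int)) (List.range n)).foldl
      (fun ans i => (if 0 < i then ans ++ ['.'] else ans) ++ ((PySem.List.pyGet? t i).getD [])) []
    = joinB (t.take n) := by
  intro n
  induction n with
  | zero => intro _; simp [joinB]
  | succ m ih =>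
    intro hm
    rw [List.range_succ, List.map_append, List.foldl_append, ih (by omega)]
    have hget : PySem.List.pyGet? t ((m : Nat) : Int) = t[m]? := PySem.List.pyGet?_natCast t m
    have hmem : t[m]? = some t[m] := List.getElem?_eq_getElem (by omega)
    cases m with
    | zero =>
      simp only [List.map_cons, List.map_nil, List.foldl_cons, List.foldl_nil]
      rw [if_neg (by norm_num)]
      rw [hget, hmem]
      have : t.take 1 = [t[0]] := by
        rw [List.take_add_one, List.take_zero]
        simp [hmem]
      simp [this, joinB]
    | succ p =>
      simp only [List.map_cons, List.map_nil, List.foldl_cons, List.foldl_nil]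
      rw [if_pos (by positivity)]
      rw [hget, hmem]
      have htake : List.take (p + 1 + 1) t = List.take (p + 1) t ++ [t[p + 1]] := by
        rw [List.take_add_one]
        simp [hmem]
      have hne : List.take (p + 1) t ≠ [] := by
        have ht : t ≠ [] := by intro h; rw [h] at hm; simp at hm
        simp [List.take_eq_nil_iff, ht]
      rw [htake, joinB_snoc _ _ hne]
      simp

-- ===== VERDICT (by name: the statement is the Claim_ definition above) =====
theorem get_package_name_spec : Claim_equal_get_package_name := by
  intro s _
  show get_package_name s = get_package_name_alt s
  unfold get_package_name get_package_name_alt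
  dsimp only
  rw [splitOn_eq]
  have htne := mysplit_ne_nil [] s.toList
  have hjoin := joinB_mysplit s.toList []
  have hlen1 : 1 ≤ (mysplit [] s.toList).length := List.length_pos_iff.mpr htne
  have hlen : ((mysplit [] s.toList).length : Int) - 1 = (((mysplit [] s.toList).length - 1 : Nat) : Int) := by
    omega
  rw [hlen, pyRange_zero, foldA _ _ (by omega), ← List.dropLast_eq_take]
  have hdots : ".".toList = ['.'] := rfl
  cases ht : mysplit [] s.toList with
  | nil => exact absurd ht htne
  | cons x r =>
    cases r with
    | nil =>
      -- single segment: no '.' in the string; A returns "", B's rfind is -1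
      have hnodot : '.' ∉ s.toList := mysplit_singleton s.toList [] x ht
      have hrf : PySem.Str.rfind s "." = -1 := by
        show PySem.Chars.rfind s.toList ".".toList = -1
        rw [hdots]
        unfold PySem.Chars.rfind
        apply rfind_go_none
        intro j _ hj
        exact hnodot (List.mem_of_getElem? hj)
      rw [hrf]
      simp [joinB]
    | cons y r' =>
      -- at least two segments: the string is p ++ '.' :: last with last dot-free
      have hdne : (x :: y :: r').dropLast ≠ [] := by simp
      have hgne : (x :: y :: r') ≠ [] := by simp
      have hsplit : (x :: y :: r').dropLast ++ [(x :: y :: r').getLast hgne] = x :: y :: r' :=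
        List.dropLast_append_getLast hgne
      have hjoin2 : joinB (x :: y :: r') =
          joinB ((x :: y :: r').dropLast) ++ '.' :: (x :: y :: r').getLast hgne := by
        conv_lhs => rw [← hsplit]
        exact joinB_snoc _ _ hdne
      have hcs : s.toList = joinB ((x :: y :: r').dropLast) ++ '.' :: (x :: y :: r').getLast hgne := by
        rw [← hjoin2, ← ht, hjoin]
        simp
      have hlast : '.' ∉ (x :: y :: r').getLast hgne := by
        have := mysplit_getLast_nodot s.toList [] (by simp) htne
        simp only [ht] at this
        exact this
      set p := joinB ((x :: y :: r').dropLast) with hp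
      have hklen : p.length < s.toList.length := by
        rw [hcs]; simp
      have hrf : PySem.Str.rfind s "." = (p.length : Int) := by
        show PySem.Chars.rfind s.toList ".".toList = (p.length : Int)
        rw [hdots]
        unfold PySem.Chars.rfind
        apply rfind_go_some
        · omega
        · rw [hcs]
          rw [List.getElem?_append_right (le_refl p.length)]
          simp
        · intro j hj1 hj2 hcontra
          rw [hcs] at hcontra
          rw [List.getElem?_append_right (by omega)] at hcontra
          have hj3 : j - p.length = (j - p.length - 1) + 1 := by omega
          rw [hj3, List.getElem?_cons_succ] at hcontra
          exact hlast (List.mem_of_getElem? hcontra)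
      rw [hrf]
      rw [if_pos (by omega)]
      have hslice : PySem.Chars.slice s.toList none (some (p.length : Int)) = s.toList.take p.length := by
        simp [PySem.List.slice_to_natCast]
      rw [hslice, hcs]
      rw [List.take_left]
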